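-- pv_equiv track=rewrite | github.com/emmabacarra/personal-utils | overengineering/sensing.py | _sym_pair_orbits_fast
-- ===== SOURCE A (Python) =====
-- def _sym_pair_orbits_fast(n, m, trajs):
--     """
--     One-representative-per-degree orbit list for T_sym^2 / Sigma_tilde_n.
--     Degree mu = |T setminus T prime|. Proposition 12 of [PRA].
--     Avoids enumerating all |T|^2 pairs.
--     """
--     M         = min(m, n - m) + 1
--     T0        = frozenset(range(m))
--     pair_reps = []
--     for mu in range(M):
--         Tp = frozenset(list(range(m - mu)) + list(range(m, m + mu)))
--         pair_reps.append(frozenset([(T0, Tp)]))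
--     return pair_reps
-- ===== SOURCE B (Python) =====
-- def _sym_pair_orbits_fast(n, m, trajs):
--     """Recursive decomposition: each degree-mu representative is obtained from T0
--     by set algebra (difference of a tail range, union of a shifted range), and the
--     list is built by recursion on the degree instead of a loop with append."""
--     M = min(m, n - m) + 1
--     T0 = frozenset(range(m))
--
--     def reps(mu):
--         if mu >= M:
--             return []
--         Tp = (T0 - frozenset(range(m - mu, m))) | frozenset(range(m, m + mu))
--         return [frozenset([(T0, Tp)])] + reps(mu + 1)
--
--     return reps(0)
-- ===== Notes on version B (the rewrite author's own statement) =====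
-- stated objective: alternative
-- what changed: B builds the list by recursion on the degree (cons-building, no accumulator) and derives each representative set from T0 by set algebra (set difference of the removed tail range, union with the shifted range) instead of A's loop that appends sets rebuilt from two range lists.
import Mathlib
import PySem

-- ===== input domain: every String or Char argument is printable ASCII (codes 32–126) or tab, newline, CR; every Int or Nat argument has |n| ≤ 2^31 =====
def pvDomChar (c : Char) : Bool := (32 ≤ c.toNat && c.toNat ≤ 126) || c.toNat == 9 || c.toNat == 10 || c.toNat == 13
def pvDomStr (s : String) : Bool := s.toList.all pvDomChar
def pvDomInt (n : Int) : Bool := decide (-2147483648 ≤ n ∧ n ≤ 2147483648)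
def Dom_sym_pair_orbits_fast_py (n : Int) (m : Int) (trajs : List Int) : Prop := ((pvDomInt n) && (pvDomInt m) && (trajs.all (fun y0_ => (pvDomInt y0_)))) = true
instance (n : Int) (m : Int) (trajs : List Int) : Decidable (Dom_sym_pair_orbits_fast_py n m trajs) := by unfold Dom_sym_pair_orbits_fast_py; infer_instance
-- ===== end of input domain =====

-- B builds the representative list by recursion on the degree and derives each set from T0
-- by set difference/union instead of A's append loop rebuilding range lists; same return value.

-- ===== PORT A =====
def sym_pair_orbits_fast_py (n : Int) (m : Int) (trajs : List Int) : List (List (List (List Int))) :=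
  let M : Int := min m (n - m) + 1
  let T0 : List Int := PySem.Set.ofList (PySem.List.pyRange 0 m)
  (PySem.List.pyRange 0 M).foldl
    (fun pair_reps mu =>
      let Tp : List Int :=
        PySem.Set.ofList (PySem.List.pyRange 0 (m - mu) ++ PySem.List.pyRange m (m + mu))
      pair_reps ++ [[[T0, Tp]]]) []

-- ===== PORT B =====
-- the recursive helper 'reps' of Source B (termination: M - mu decreases)
def pvRepsB (m : Int) (M : Int) (T0 : List Int) (mu : Int) : List (List (List (List Int))) :=
  if M ≤ mu then []
  else
    let Tp : List Int :=
      PySem.Set.union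
        (PySem.Set.diff T0 (PySem.Set.ofList (PySem.List.pyRange (m - mu) m)))
        (PySem.Set.ofList (PySem.List.pyRange m (m + mu)))
    [[T0, Tp]] :: pvRepsB m M T0 (mu + 1)
termination_by (M - mu).toNat
decreasing_by omega

def sym_pair_orbits_fast_py_alt (n : Int) (m : Int) (trajs : List Int) : List (List (List (List Int))) :=
  let M : Int := min m (n - m) + 1
  let T0 : List Int := PySem.Set.ofList (PySem.List.pyRange 0 m)
  pvRepsB m M T0 0

-- ===== PRECONDITION & SPEC =====
def Spec_sym_pair_orbits_fast_py (n : Int) (m : Int) (trajs : List Int) (out : List (List (List (List Int)))) : Prop := out = sym_pair_orbits_fast_py_alt n m trajs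
instance (n : Int) (m : Int) (trajs : List Int) (out : List (List (List (List Int)))) : Decidable (Spec_sym_pair_orbits_fast_py n m trajs out) := by unfold Spec_sym_pair_orbits_fast_py; infer_instance

-- ===== CLAIM =====
def Claim_equal_sym_pair_orbits_fast_py : Prop := ∀ (n : Int) (m : Int) (trajs : List Int), Dom_sym_pair_orbits_fast_py n m trajs → Spec_sym_pair_orbits_fast_py n m trajs (sym_pair_orbits_fast_py n m trajs)

-- ===== LEMMAS AND PROOFS =====

-- the representative set of degree mu, as a plain (duplicate-free) list
def pvTpl (m mu : Int) : List Int :=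
  PySem.List.pyRange 0 (m - mu) ++ PySem.List.pyRange m (m + mu)

theorem pvTpl_nodup (m mu : Int) : (pvTpl m mu).Nodup := by
  unfold pvTpl
  refine List.Nodup.append (PySem.List.nodup_pyRange_one _ _) (PySem.List.nodup_pyRange_one _ _) ?_
  intro x hx hy
  rw [PySem.List.mem_pyRange_one] at hx hy
  omega

theorem pvOfList_tpl (m mu : Int) :
    PySem.Set.ofList (pvTpl m mu) = pvTpl m mu :=
  PySem.Set.ofList_eq_self_of_nodup _ (pvTpl_nodup m mu)

-- generic shape of A's loop: append-one-element foldl is a map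
theorem pvFoldl_append_map {α β : Type} (l : List α) (g : α → β) (acc : List β) :
    l.foldl (fun a x => a ++ [g x]) acc = acc ++ l.map g := by
  induction l generalizing acc with
  | nil => simp
  | cons x xs ih => simp [List.foldl_cons, ih, List.append_assoc]

-- union with a nodup list disjoint from s is plain append
theorem pvUnion_append {s t : List Int} (hnd : t.Nodup) (hdisj : ∀ x ∈ t, x ∉ s) :
    PySem.Set.union s t = s ++ t := by
  show List.foldl PySem.Set.add s t = s ++ t
  induction t generalizing s with
  | nil => simp
  | cons x xs ih =>
    rw [List.foldl_cons,
        PySem.Set.add_of_not_mem (hdisj x (List.mem_cons_self))]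
    rw [ih hnd.of_cons]
    · simp
    · intro y hy
      have := hdisj y (List.mem_cons_of_mem _ hy)
      have hne : y ≠ x := fun h => (List.nodup_cons.mp hnd).1 (h ▸ hy)
      simp [this, hne]

-- B's set-algebra expression for the degree-mu representative equals pvTpl
theorem pvTp_alg (m mu : Int) (h0 : 0 ≤ mu) (hm : mu ≤ m) :
    PySem.Set.union
      (PySem.Set.diff (PySem.List.pyRange 0 m) (PySem.Set.ofList (PySem.List.pyRange (m - mu) m)))
      (PySem.Set.ofList (PySem.List.pyRange m (m + mu))) = pvTpl m mu := by
  have hnd2 : (PySem.List.pyRange (m - mu) m).Nodup := PySem.List.nodup_pyRange_one _ _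
  have hnd3 : (PySem.List.pyRange m (m + mu)).Nodup := PySem.List.nodup_pyRange_one _ _
  rw [PySem.Set.ofList_eq_self_of_nodup _ hnd2, PySem.Set.ofList_eq_self_of_nodup _ hnd3]
  have hdiff : PySem.Set.diff (PySem.List.pyRange 0 m) (PySem.List.pyRange (m - mu) m) =
      PySem.List.pyRange 0 (m - mu) := by
    show List.filter _ _ = _
    rw [PySem.List.pyRange_one_append 0 (m - mu) m (by omega) (by omega), List.filter_append]
    have e1 : List.filter (fun x => !PySem.Set.contains (PySem.List.pyRange (m - mu) m) x)
        (PySem.List.pyRange 0 (m - mu)) = PySem.List.pyRange 0 (m - mu) := by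
      apply List.filter_eq_self.mpr
      intro a ha
      rw [PySem.List.mem_pyRange_one] at ha
      have h : a ∉ PySem.List.pyRange (m - mu) m := by
        rw [PySem.List.mem_pyRange_one]; omega
      have hc : PySem.Set.contains (PySem.List.pyRange (m - mu) m) a = false := by
        rw [← Bool.not_eq_true, PySem.Set.contains_iff]; exact h
      rw [hc]; rfl
    have e2 : List.filter (fun x => !PySem.Set.contains (PySem.List.pyRange (m - mu) m) x)
        (PySem.List.pyRange (m - mu) m) = [] := by
      apply List.filter_eq_nil_iff.mpr
      intro a ha
      have hc : PySem.Set.contains (PySem.List.pyRange (m - mu) m) a = true := by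
        rw [PySem.Set.contains_iff]; exact ha
      rw [hc]; simp
    rw [e1, e2, List.append_nil]
  rw [hdiff]
  rw [pvUnion_append hnd3]
  · rfl
  · intro x hx hx'
    rw [PySem.List.mem_pyRange_one] at hx hx'
    omega

-- B's recursion computes, from degree mu on, the mapped tail of the range
theorem pvRepsLem (m M : Int) (hMm : M ≤ m + 1) (j : Nat) :
    ∀ mu : Int, 0 ≤ mu → (M - mu).toNat = j →
    pvRepsB m M (PySem.List.pyRange 0 m) mu =
      (PySem.List.pyRange mu M).map
        (fun mu => [[PySem.List.pyRange 0 m, pvTpl m mu]]) := by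
  induction j with
  | zero =>
    intro mu h0 hj
    have hle : M ≤ mu := by omega
    rw [pvRepsB, if_pos hle, PySem.List.pyRange_one_eq_nil hle, List.map_nil]
  | succ j ih =>
    intro mu h0 hj
    have hlt : mu < M := by omega
    rw [pvRepsB, if_neg (by omega : ¬ M ≤ mu)]
    rw [PySem.List.pyRange_one_cons hlt, List.map_cons]
    simp only
    rw [pvTp_alg m mu h0 (by omega)]
    rw [ih (mu + 1) (by omega) (by omega)]

theorem pvMain (n m : Int) (trajs : List Int) :
    sym_pair_orbits_fast_py n m trajs = sym_pair_orbits_fast_py_alt n m trajs := by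
  unfold sym_pair_orbits_fast_py sym_pair_orbits_fast_py_alt
  dsimp only
  have hT0 : PySem.Set.ofList (PySem.List.pyRange 0 m) = PySem.List.pyRange 0 m :=
    PySem.Set.ofList_eq_self_of_nodup _ (PySem.List.nodup_pyRange_one _ _)
  rw [hT0]
  rw [pvFoldl_append_map, List.nil_append]
  rw [pvRepsLem m (min m (n - m) + 1) (by omega) ((min m (n - m) + 1) - 0).toNat 0 le_rfl rfl]
  apply List.map_congr_left
  intro mu _
  rw [show PySem.List.pyRange 0 (m - mu) ++ PySem.List.pyRange m (m + mu) = pvTpl m mu from rfl,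
      pvOfList_tpl]

-- ===== VERDICT =====
theorem sym_pair_orbits_fast_py_spec : Claim_equal_sym_pair_orbits_fast_py := by
  intro n m trajs _
  unfold Spec_sym_pair_orbits_fast_py
  exact pvMain n m trajs
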